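-- pv_equiv track=rewrite | github.com/JysusAle/asistente-vitual-ia | amor.py | formatea_instrucciones
-- ===== SOURCE A (Python) =====
-- from typing import Dict, List, Tuple, Optional, Set
--
-- def formatea_instrucciones(ruta: List[Tuple[str, str]], distancia_total: int) -> str:
--     if not ruta:
--         return "No se encontró ruta."
--     segmentos = []
--     cur_line = ruta[0][0]
--     start_station = ruta[0][1]
--     for i in range(1, len(ruta)):
--         line_i, est_i = ruta[i]
--         prev_line, prev_est = ruta[i-1]
--         if line_i != prev_line:
--             segmentos.append((cur_line, start_station, prev_est))
--             cur_line = line_i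
--             start_station = est_i
--     segmentos.append((cur_line, start_station, ruta[-1][1]))
--     instrucciones = []
--     for (ln, a, b) in segmentos:
--         instrucciones.append(f"• Toma {ln} desde '{a}' hasta '{b}'.")
--     instrucciones.append(f"Distancia total estimada: {distancia_total} m")
--     return "\n".join(instrucciones)
-- ===== SOURCE B (Python) =====
-- def formatea_instrucciones(ruta, distancia_total):
--     if not ruta:
--         return "No se encontró ruta."
--     # Walk the route right-to-left; every segment is complete at all times:
--     # a station on the same line as the segment built most recently just
--     # moves that segment's start earlier; otherwise a fresh one-station
--     # segment is opened. Reverse once at the end.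
--     segs = []
--     for line, est in reversed(ruta):
--         if segs and segs[-1][0] == line:
--             segs[-1] = (line, est, segs[-1][2])
--         else:
--             segs.append((line, est, est))
--     segs.reverse()
--     lineas = [f"• Toma {ln} desde '{a}' hasta '{b}'." for ln, a, b in segs]
--     lineas.append(f"Distancia total estimada: {distancia_total} m")
--     return "\n".join(lineas)
-- ===== Notes on version B (the rewrite author's own statement) =====
-- stated objective: alternative
-- what changed: A scans forward with open cur_line/start_station accumulators, closing a segment only when it sees a line change between consecutive route entries; B walks the route right-to-left keeping a list of always-complete segments, merging each station into the start of the most recent segment when lines match, then reverses the segment list once.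
import Mathlib
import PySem

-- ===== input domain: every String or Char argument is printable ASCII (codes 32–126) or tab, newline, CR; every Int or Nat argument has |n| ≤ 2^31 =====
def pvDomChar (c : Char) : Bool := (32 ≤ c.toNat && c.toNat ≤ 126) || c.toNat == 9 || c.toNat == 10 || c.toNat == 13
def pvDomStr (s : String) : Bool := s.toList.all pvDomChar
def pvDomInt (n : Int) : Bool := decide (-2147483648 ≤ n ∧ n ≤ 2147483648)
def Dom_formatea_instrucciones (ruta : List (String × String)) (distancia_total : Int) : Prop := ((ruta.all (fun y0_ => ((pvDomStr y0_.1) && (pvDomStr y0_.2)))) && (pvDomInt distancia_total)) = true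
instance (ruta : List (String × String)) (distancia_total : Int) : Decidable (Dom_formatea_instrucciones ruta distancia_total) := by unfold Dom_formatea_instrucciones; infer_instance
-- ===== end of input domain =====

-- B replaces A's forward boundary-detection loop (open cur_line/start_station accumulators)
-- by a right-to-left pass that merges each station into the start of the most recent
-- always-complete segment, reversing once at the end (objective: alternative, same cost).

-- ===== PORT A =====
-- loop body of A's 'for i in range(1, len(ruta))'
def stepA (ruta : List (String × String))
    (s : List (String × String × String) × String × String) (i : Int) :
    List (String × String × String) × String × String :=
  let li := PySem.List.pyGetD ruta i ("", "")
  let prev := PySem.List.pyGetD ruta (i - 1) ("", "")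
  if li.1 ≠ prev.1 then (s.1 ++ [(s.2.1, s.2.2, prev.2)], li.1, li.2) else s

def formatea_instrucciones (ruta : List (String × String)) (distancia_total : Int) : String :=
  match ruta with
  | [] => "No se encontró ruta."
  | r0 :: _ =>
    let st := (PySem.List.pyRange 1 ((ruta.length : Nat) : Int) 1).foldl (stepA ruta) ([], r0.1, r0.2)
    let segmentos := st.1 ++ [(st.2.1, st.2.2, (PySem.List.pyGetD ruta (-1) ("", "")).2)]
    let instrucciones := segmentos.map (fun t =>
      "• Toma " ++ t.1 ++ " desde '" ++ t.2.1 ++ "' hasta '" ++ t.2.2 ++ "'.")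
    PySem.Str.join "\n" (instrucciones ++ ["Distancia total estimada: " ++ PySem.Int.toStr distancia_total ++ " m"])

-- ===== PORT B =====
-- body of B's 'for line, est in reversed(ruta)': merge into segs[-1] or append a fresh segment
def stepB (segs : List (String × String × String)) (p : String × String) :
    List (String × String × String) :=
  match segs.getLast? with
  | some s =>
    if s.1 = p.1 then segs.dropLast ++ [(p.1, p.2, s.2.2)]
    else segs ++ [(p.1, p.2, p.2)]
  | none => segs ++ [(p.1, p.2, p.2)]

def formatea_instrucciones_alt (ruta : List (String × String)) (distancia_total : Int) : String :=
  match ruta with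
  | [] => "No se encontró ruta."
  | _ :: _ =>
    let segs := (ruta.reverse.foldl stepB []).reverse
    let lineas := segs.map (fun t =>
      "• Toma " ++ t.1 ++ " desde '" ++ t.2.1 ++ "' hasta '" ++ t.2.2 ++ "'.")
    PySem.Str.join "\n" (lineas ++ ["Distancia total estimada: " ++ PySem.Int.toStr distancia_total ++ " m"])

-- ===== PRECONDITION & SPEC =====
def Spec_formatea_instrucciones (ruta : List (String × String)) (distancia_total : Int) (out : String) : Prop := out = formatea_instrucciones_alt ruta distancia_total
instance (ruta : List (String × String)) (distancia_total : Int) (out : String) : Decidable (Spec_formatea_instrucciones ruta distancia_total out) := by unfold Spec_formatea_instrucciones; infer_instance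

-- ===== CLAIM (what is proved, stated in full; the proofs are below) =====
def Claim_equal_formatea_instrucciones : Prop := ∀ (ruta : List (String × String)) (distancia_total : Int), Dom_formatea_instrucciones ruta distancia_total → Spec_formatea_instrucciones ruta distancia_total (formatea_instrucciones ruta distancia_total)

-- ===== LEMMAS AND PROOFS =====

-- canonical grouping: merge the head into the head of the tail's grouping
def segsOf : List (String × String) → List (String × String × String)
  | [] => []
  | p :: ps =>
    match segsOf ps with
    | [] => [(p.1, p.2, p.2)]
    | s :: ss => if s.1 = p.1 then (p.1, p.2, s.2.2) :: ss else (p.1, p.2, p.2) :: s :: ss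

-- the longest prefix on line l, and what follows
def spanLine (l : String) : List (String × String) → List (String × String) × List (String × String)
  | [] => ([], [])
  | p :: rest =>
    if p.1 = l then
      let gr := spanLine l rest
      (p :: gr.1, gr.2)
    else ([], p :: rest)

theorem spanLine_snd_length (l : String) (xs : List (String × String)) :
    (spanLine l xs).2.length ≤ xs.length := by
  induction xs with
  | nil => simp [spanLine]
  | cons p rest ih =>
    simp only [spanLine]
    split
    · simpa using Nat.le_succ_of_le ih
    · simp

-- span-based grouping (one segment per maximal run)
def groupSegs : List (String × String) → List (String × String × String)
  | [] => []
  | p :: ps =>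
    (p.1, p.2, ((spanLine p.1 ps).1.getLastD p).2) :: groupSegs (spanLine p.1 ps).2
termination_by xs => xs.length
decreasing_by
  simpa using Nat.lt_succ_of_le (spanLine_snd_length p.1 ps)

theorem segsOf_eq_groupSegs (l : List (String × String)) : segsOf l = groupSegs l := by
  induction l with
  | nil => simp [segsOf, groupSegs]
  | cons p ps ih =>
    cases ps with
    | nil => simp [segsOf, groupSegs, spanLine]
    | cons q qs =>
      have hgroup : groupSegs (q :: qs)
          = (q.1, q.2, ((spanLine q.1 qs).1.getLastD q).2) :: groupSegs (spanLine q.1 qs).2 := by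
        rw [groupSegs]
      by_cases h : q.1 = p.1
      · have hspan : spanLine p.1 (q :: qs) = (q :: (spanLine p.1 qs).1, (spanLine p.1 qs).2) := by
          simp [spanLine, h]
        conv_lhs => rw [segsOf, ih, hgroup]
        conv_rhs => rw [groupSegs]
        rw [hspan]
        simp only [if_pos h]
        rw [← h]
        simp [-List.getLastD_eq_getLast?, List.getLastD_cons]
      · have hspan : spanLine p.1 (q :: qs) = ([], q :: qs) := by
          simp [spanLine, h]
        conv_lhs => rw [segsOf, ih, hgroup]
        conv_rhs => rw [groupSegs]
        rw [hspan]
        conv_rhs => rw [hgroup]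
        simp [List.getLastD, h]

-- B's reversed fold computes segsOf
theorem foldB_eq_segsOf (l : List (String × String)) :
    (l.reverse.foldl stepB []).reverse = segsOf l := by
  induction l with
  | nil => rfl
  | cons p ps ih =>
    have hS : ps.reverse.foldl stepB [] = (segsOf ps).reverse := by
      rw [← ih, List.reverse_reverse]
    rw [List.reverse_cons, List.foldl_append, List.foldl_cons, List.foldl_nil, hS]
    cases hs : segsOf ps with
    | nil => simp [stepB, segsOf, hs]
    | cons s ss =>
      simp only [segsOf, hs, stepB, List.reverse_cons, List.getLast?_append,
        List.getLast?_singleton, Option.some_or]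
      by_cases h : s.1 = p.1
      · simp [h]
      · simp [h]

-- A's loop, rephrased as a structural recursion carrying the previous element
def loopA (prev : String × String) (l : List (String × String))
    (s : List (String × String × String) × String × String) :
    List (String × String × String) × String × String :=
  match l with
  | [] => s
  | p :: ps =>
    loopA p ps (if p.1 ≠ prev.1 then (s.1 ++ [(s.2.1, s.2.2, prev.2)], p.1, p.2) else s)

theorem pyGetD_append_left (xs : List (String × String)) (b : String × String) (i : Int)
    (h0 : 0 ≤ i) (h1 : i < (xs.length : Int)) :
    PySem.List.pyGetD (xs ++ [b]) i ("", "") = PySem.List.pyGetD xs i ("", "") := by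
  rw [PySem.List.pyGetD_eq_getElem _ _ h0 (by simp; omega),
      PySem.List.pyGetD_eq_getElem _ _ h0 h1]
  exact List.getElem_append_left (by omega)

theorem getLastD_cons_cons (a p : String × String) (l : List (String × String))
    (d : String × String) : (a :: p :: l).getLastD d = (p :: l).getLastD d := by
  simp

theorem loopA_append (l : List (String × String)) (a b : String × String) (s) :
    loopA a (l ++ [b]) s =
      (if b.1 ≠ ((a :: l).getLastD ("", "")).1 then
        ((loopA a l s).1 ++ [((loopA a l s).2.1, (loopA a l s).2.2, ((a :: l).getLastD ("", "")).2)], b.1, b.2)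
      else loopA a l s) := by
  induction l generalizing a s with
  | nil => simp [loopA]
  | cons p ps ih =>
    simp only [List.cons_append, loopA]
    rw [ih]
    rw [getLastD_cons_cons]

theorem fold_eq_loopA (l : List (String × String)) (a : String × String) (s) :
    (PySem.List.pyRange 1 (((a :: l).length : Nat) : Int) 1).foldl (stepA (a :: l)) s = loopA a l s := by
  induction l using List.reverseRecOn generalizing s with
  | nil =>
    rw [PySem.List.pyRange_one_eq_nil (by simp)]
    simp [loopA]
  | append_singleton l b ih =>
    have hlen1 : (1 : Int) ≤ (((a :: l).length : Nat) : Int) := by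
      simp only [List.length_cons]; omega
    have hlen : (((a :: (l ++ [b])).length : Nat) : Int) = (((a :: l).length : Nat) : Int) + 1 := by
      push_cast [List.length_append, List.length_cons, List.length_nil]; ring
    rw [hlen, PySem.List.pyRange_one_succ_right hlen1, List.foldl_append]
    have h2 : a :: (l ++ [b]) = (a :: l) ++ [b] := rfl
    have hcongr : (PySem.List.pyRange 1 (((a :: l).length : Nat) : Int) 1).foldl (stepA (a :: (l ++ [b]))) s
        = (PySem.List.pyRange 1 (((a :: l).length : Nat) : Int) 1).foldl (stepA (a :: l)) s := by
      apply PySem.List.foldl_congr_mem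
      intro acc i hi
      rw [PySem.List.mem_pyRange_one] at hi
      unfold stepA
      rw [h2, pyGetD_append_left _ _ _ (by omega) hi.2,
          pyGetD_append_left _ _ _ (by omega) (by omega)]
    rw [hcongr, ih, loopA_append]
    simp only [List.foldl_cons, List.foldl_nil]
    unfold stepA
    rw [h2]
    have hb : PySem.List.pyGetD ((a :: l) ++ [b]) (((a :: l).length : Nat) : Int) ("", "") = b := by
      rw [PySem.List.pyGetD_natCast]
      simp
    have e : ((((a :: l).length : Nat) : Int) - 1) = ((l.length : Nat) : Int) := by
      simp only [List.length_cons]; push_cast; ring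
    have hprev : PySem.List.pyGetD ((a :: l) ++ [b]) ((((a :: l).length : Nat) : Int) - 1) ("", "")
        = (a :: l).getLastD ("", "") := by
      rw [e, PySem.List.pyGetD_natCast]
      rw [List.getD_eq_getElem?_getD, List.getElem?_append_left (by simp)]
      rw [List.getLastD_eq_getLast?, List.getLast?_eq_getElem?]
      simp
    rw [hb, hprev]

-- prefix invariance of loopA's segment accumulator
theorem loopA_shift (l : List (String × String)) (a : String × String)
    (segs : List (String × String × String)) (c st : String) :
    loopA a l (segs, c, st) =
      (segs ++ (loopA a l ([], c, st)).1, (loopA a l ([], c, st)).2) := by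
  induction l generalizing a segs c st with
  | nil => simp [loopA]
  | cons p ps ih =>
    simp only [loopA]
    split
    · simp only [List.nil_append]
      rw [ih p (segs ++ [(c, st, a.2)]) p.1 p.2, ih p [(c, st, a.2)] p.1 p.2]
      simp
    · exact ih p segs c st

-- A's closed segment list is the span-based grouping (start generalized)
theorem segs_eq_group (l : List (String × String)) (a : String × String) (start : String) :
    (loopA a l ([], a.1, start)).1
      ++ [((loopA a l ([], a.1, start)).2.1, (loopA a l ([], a.1, start)).2.2,
            ((a :: l).getLastD ("", "")).2)]
    = (a.1, start, ((spanLine a.1 l).1.getLastD a).2) :: groupSegs (spanLine a.1 l).2 := by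
  induction l generalizing a start with
  | nil => simp [loopA, spanLine, groupSegs]
  | cons p ps ih =>
    by_cases h : p.1 = a.1
    · have hl : loopA a (p :: ps) ([], a.1, start) = loopA p ps ([], p.1, start) := by
        simp [loopA, h]
      have hspan : spanLine a.1 (p :: ps) = (p :: (spanLine a.1 ps).1, (spanLine a.1 ps).2) := by
        simp [spanLine, h]
      rw [hl, hspan, getLastD_cons_cons, ih p start]
      rw [← h]
      rw [List.getLastD_cons]
    · have hl : loopA a (p :: ps) ([], a.1, start)
          = loopA p ps ([(a.1, start, a.2)], p.1, p.2) := by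
        simp [loopA, h]
      have hspan : spanLine a.1 (p :: ps) = ([], p :: ps) := by
        simp [spanLine, h]
      rw [hl, hspan, getLastD_cons_cons, loopA_shift ps p [(a.1, start, a.2)] p.1 p.2]
      simp only [List.cons_append, List.nil_append]
      rw [ih p p.2]
      conv_rhs => rw [groupSegs]
      simp [List.getLastD]

-- ===== VERDICT (by name: the statement is the Claim_ definition above) =====
theorem formatea_instrucciones_spec : Claim_equal_formatea_instrucciones := by
  intro ruta distancia_total _
  unfold Spec_formatea_instrucciones
  match ruta with
  | [] => rfl
  | a :: l =>
    unfold formatea_instrucciones formatea_instrucciones_alt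
    simp only
    congr 1
    congr 1
    rw [fold_eq_loopA]
    have hlast : PySem.List.pyGetD (a :: l) (-1) ("", "") = (a :: l).getLastD ("", "") := by
      rw [PySem.List.pyGetD_neg_one _ _ (by simp), List.getLast_eq_getLastD]
      cases l with
      | nil => simp
      | cons b t => simp [List.getLastD]
    rw [hlast]
    congr 1
    rw [segs_eq_group l a a.2, foldB_eq_segsOf, segsOf_eq_groupSegs]
    conv_rhs => rw [groupSegs]
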